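-- pv_equiv track=rewrite | github.com/liupengsay/PyIsTheBestLang | src/dp/matrix_dp/problem.py | lc_1937
-- ===== SOURCE A (Python) =====
-- import math
-- from typing import List
--
-- def lc_1937(points: List[List[int]]) -> int:
--     """
--     url: https://leetcode.cn/problems/maximum-number-of-points-with-cost/
--     tag: prefix_sum|matrix_dp
--     """
--     # 矩阵prefix_sum后缀和优化的DP
--     m, n = len(points), len(points[0])
--     pre = points[0][:]
--
--     for i in range(1, m):
--         left = [0] * n
--         for j in range(n):
--             a = -math.inf if not j else left[j - 1]
--             b = pre[j] + j
--             left[j] = a if a > b else b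
--
--         right = [0] * n
--         for j in range(n - 1, -1, -1):
--             a = -math.inf if j == n - 1 else right[j + 1]
--             b = pre[j] - j
--             right[j] = a if a > b else b
--
--         for j in range(n):
--             a = left[j] - j + points[i][j]
--             b = right[j] + j + points[i][j]
--             pre[j] = a if a > b else b
--
--     return max(pre)
-- ===== SOURCE B (Python) =====
-- def lc_1937(points):
--     # divide & conquer: spread(vals)[j] = max_k(vals[k] - |j - k|), computed by
--     # solving each half recursively and adding the cross-boundary "cone" from
--     # the other half's edge value
--     def spread(vals):
--         if len(vals) <= 1:
--             return vals[:]
--         mid = len(vals) // 2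
--         left = spread(vals[:mid])
--         right = spread(vals[mid:])
--         return [max(l, right[0] - (len(left) - i)) for i, l in enumerate(left)] + \
--                [max(r, left[-1] - 1 - i) for i, r in enumerate(right)]
--
--     best = points[0][:]
--     for row in points[1:]:
--         best = [c + p for c, p in zip(spread(best), row)]
--     return max(best)
-- ===== Notes on version B (the rewrite author's own statement) =====
-- stated objective: alternative
-- what changed: replaces A's per-row left/right offset-array sweeps (pre[j]+j, pre[j]-j with a -inf sentinel, plus a combining loop) with a recursive divide-and-conquer that computes max_k(pre[k]-|j-k|) by solving each half and merging in the cross-boundary cone from the other half's edge value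
import Mathlib
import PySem

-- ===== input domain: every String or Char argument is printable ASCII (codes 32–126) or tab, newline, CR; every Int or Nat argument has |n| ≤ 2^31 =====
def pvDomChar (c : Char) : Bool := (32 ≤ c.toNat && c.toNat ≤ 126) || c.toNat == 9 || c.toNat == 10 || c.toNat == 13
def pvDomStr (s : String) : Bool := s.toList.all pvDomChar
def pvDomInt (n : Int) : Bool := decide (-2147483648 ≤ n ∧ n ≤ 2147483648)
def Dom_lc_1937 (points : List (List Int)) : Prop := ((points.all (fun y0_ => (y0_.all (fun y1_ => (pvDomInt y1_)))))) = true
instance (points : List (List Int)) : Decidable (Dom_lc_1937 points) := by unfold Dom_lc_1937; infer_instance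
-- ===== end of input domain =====

-- B replaces A's two offset-array sweeps (pre[j]+j / pre[j]-j with a -inf sentinel) and the
-- combining loop by a divide-and-conquer that computes max_k(pre[k]-|j-k|) per row: solve each
-- half recursively and merge with the cross-boundary cone from the other half's edge value.


-- ===== PORT A =====
-- left loop: `a = -math.inf if not j else left[j-1]`; since `-inf > b` is always False the
-- j = 0 iteration takes b, so we carry left[j-1] as an Option (none ⇔ j = 0); exact on Int rows.
def pvLeftA (j : Int) (prev : Option Int) : List Int → List Int
  | [] => []
  | x :: xs =>
    let b := x + j
    let v := match prev with
      | none => b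
      | some a => if a > b then a else b
    v :: pvLeftA (j + 1) (some v) xs

-- right loop, j descending; right[j+1] is the head of the already-built suffix (none ⇔ j = n-1)
def pvRightA (j : Int) : List Int → List Int
  | [] => []
  | x :: xs =>
    let rest := pvRightA (j + 1) xs
    let b := x - j
    let v := match rest.head? with
      | none => b
      | some a => if a > b then a else b
    v :: rest

-- final loop `pre[j] = a if a > b else b` over left/right/points[i]
def pvCombineA (j : Int) : List Int → List Int → List Int → List Int
  | l :: ls, r :: rs, p :: ps =>
    let a := l - j + p
    let b := r + j + p
    (if a > b then a else b) :: pvCombineA (j + 1) ls rs ps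
  | _, _, _ => []

-- `for i in range(1, m): … points[i]` visits exactly the rows of points[1:], folded here
def lc_1937 (points : List (List Int)) : Int :=
  let pre := points.headD []    -- points[0][:] (IndexError on [] is excluded by Pre_)
  let fin := (points.drop 1).foldl
    (fun pre row => pvCombineA 0 (pvLeftA 0 none pre) (pvRightA 0 pre) row) pre
  (PySem.List.max? fin (fun x => x)).getD 0   -- max(pre); empty row excluded by Pre_

-- ===== PORT B =====
-- `[max(l, right[0] - (len(left) - i)) for i, l in enumerate(left)]`: d carries len(left) - i
def pvCombL (r0 : Int) : Int → List Int → List Int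
  | _, [] => []
  | d, l :: ls => max l (r0 - d) :: pvCombL r0 (d - 1) ls

-- `[max(r, left[-1] - 1 - i) for i, r in enumerate(right)]`
def pvCombR (lLast : Int) : Int → List Int → List Int
  | _, [] => []
  | i, r :: rs => max r (lLast - 1 - i) :: pvCombR lLast (i + 1) rs

-- `spread`: divide and conquer; right[0] / left[-1] exist (both halves are nonempty), the
-- .headD 0 / .getLastD 0 defaults are never taken
def pvSpread (vals : List Int) : List Int :=
  if h : vals.length ≤ 1 then vals   -- `return vals[:]`
  else
    let mid := vals.length / 2
    let left := pvSpread (vals.take mid)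
    let right := pvSpread (vals.drop mid)
    pvCombL (right.headD 0) (left.length : Int) left ++ pvCombR (left.getLastD 0) 0 right
termination_by vals.length
decreasing_by
  · simp only [List.length_take]; omega
  · simp only [List.length_drop]; omega

def lc_1937_alt (points : List (List Int)) : Int :=
  let fin := (points.drop 1).foldl
    (fun best row => List.zipWith (fun c p => c + p) (pvSpread best) row)  -- zip(spread(best), row)
    (points.headD [])    -- points[0][:]
  (PySem.List.max? fin (fun x => x)).getD 0   -- max(best)

-- ===== PRECONDITION & SPEC =====
-- Pre_ excludes exactly the inputs where Python A raises: an empty matrix or an empty first row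
-- (IndexError / max of empty), and rows shorter than row 0 (IndexError at points[i][j]);
-- columns beyond row 0's length are ignored by A and are allowed.
def Pre_lc_1937 (points : List (List Int)) : Prop :=
  points ≠ [] ∧ points.headD [] ≠ [] ∧ ∀ r ∈ points, (points.headD []).length ≤ r.length
instance (points : List (List Int)) : Decidable (Pre_lc_1937 points) := by
  unfold Pre_lc_1937; infer_instance

def pvWitness_lc_1937 : List (List Int) := [[1, 2, 3], [1, 5, 1], [3, 1, 1]]

def Spec_lc_1937 (points : List (List Int)) (out : Int) : Prop := out = lc_1937_alt points
instance (points : List (List Int)) (out : Int) : Decidable (Spec_lc_1937 points out) := by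
  unfold Spec_lc_1937; infer_instance

-- ===== CLAIM (what is proved, stated in full; the proofs are below) =====
def Claim_equal_lc_1937 : Prop :=
  ∀ (points : List (List Int)), Dom_lc_1937 points → Pre_lc_1937 points →
    Spec_lc_1937 points (lc_1937 points)

-- ===== LEMMAS AND PROOFS =====

-- both ports' rows are shown equal to the "brute" list whose j-th entry is max_k (pre[k] - |j-k|)

def pvStep (p : Option Int) (x : Int) : Int :=
  match p with | none => x | some s => max x (s - 1)

-- left-to-right running max decremented per step (A's left array, index-offset removed)
def pvSweep (prev : Option Int) : List Int → List Int
  | [] => []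
  | x :: xs =>
    let v := match prev with
      | none => x
      | some p => max x (p - 1)
    v :: pvSweep (some v) xs

-- the right-to-left analogue, as structural recursion from the right
def pvRsw : List Int → List Int
  | [] => []
  | x :: xs => pvStep (pvRsw xs).head? x :: pvRsw xs

def pvAddIdx (j : Int) : List Int → List Int
  | [] => []
  | x :: xs => (x + j) :: pvAddIdx (j + 1) xs

def pvSubIdx (j : Int) : List Int → List Int
  | [] => []
  | x :: xs => (x - j) :: pvSubIdx (j + 1) xs

def pvOMax : Option Int → Option Int → Option Int
  | none, b => b
  | some a, none => some a
  | some a, some b => some (max a b)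

-- max of x - |j - idx| over the list, idx starting at k
def pvMx (j k : Int) : List Int → Option Int
  | [] => none
  | x :: xs => pvOMax (some (x - |j - k|)) (pvMx j (k + 1) xs)

def pvQv (q : Option Int) (j : Int) : Option Int := q.map (fun s => s - (j + 1))

-- the brute list, n entries starting at index j, with an optional carried seed q
def pvBQgo (q : Option Int) (pre : List Int) : Int → Nat → List Int
  | _, 0 => []
  | j, n + 1 => (pvOMax (pvQv q j) (pvMx j 0 pre)).getD 0 :: pvBQgo q pre (j + 1) n

lemma pvIfMax (a b : Int) : (if a > b then a else b) = max a b := by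
  by_cases h : a > b <;> simp [h] <;> omega

lemma pvLeftA_eq (pre : List Int) : ∀ (j : Int) (q : Option Int),
    pvLeftA j (q.map (fun s => s + (j - 1))) pre = pvAddIdx j (pvSweep q pre) := by
  induction pre with
  | nil => intro j q; simp [pvLeftA, pvSweep, pvAddIdx]
  | cons x xs ih =>
    intro j q
    cases q with
    | none =>
      simp only [Option.map_none, pvLeftA, pvSweep, pvAddIdx]
      have := ih (j + 1) (some x)
      simp only [Option.map_some] at this
      rw [show x + (j + 1 - 1) = x + j by ring] at this
      exact congrArg _ this
    | some s =>
      simp only [Option.map_some, pvLeftA, pvSweep, pvAddIdx]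
      have hv : (if s + (j - 1) > x + j then s + (j - 1) else x + j) = max x (s - 1) + j := by
        rw [pvIfMax]
        rw [show max x (s - 1) + j = max (x + j) ((s - 1) + j) by rw [max_add_add_right]]
        rw [max_comm]
        congr 1
        ring
      rw [hv]
      have := ih (j + 1) (some (max x (s - 1)))
      simp only [Option.map_some] at this
      rw [show max x (s - 1) + (j + 1 - 1) = max x (s - 1) + j by ring] at this
      exact congrArg _ this

lemma pvRightA_eq (pre : List Int) : ∀ (j : Int),
    pvRightA j pre = pvSubIdx j (pvRsw pre) := by
  induction pre with
  | nil => intro j; simp [pvRightA, pvRsw, pvSubIdx]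
  | cons x xs ih =>
    intro j
    simp only [pvRightA, pvRsw, pvSubIdx, ih (j + 1)]
    cases h : pvRsw xs with
    | nil => simp [pvSubIdx, pvStep]
    | cons s rest =>
      simp only [pvSubIdx, List.head?_cons, pvStep, pvIfMax]
      congr 1
      rw [← max_sub_sub_right, max_comm]
      congr 1
      ring

lemma pvCombineA_eq (L : List Int) : ∀ (R row : List Int) (j : Int),
    pvCombineA j (pvAddIdx j L) (pvSubIdx j R) row =
      List.zipWith (fun c p => c + p) (List.zipWith max L R) row := by
  induction L with
  | nil => intro R row j; cases R <;> cases row <;> simp [pvAddIdx, pvSubIdx, pvCombineA]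
  | cons l ls ih =>
    intro R row j
    cases R with
    | nil => cases row <;> simp [pvAddIdx, pvSubIdx, pvCombineA]
    | cons r rs =>
      cases row with
      | nil => simp [pvAddIdx, pvSubIdx, pvCombineA]
      | cons p ps =>
        simp only [pvAddIdx, pvSubIdx, pvCombineA, List.zipWith, ih]
        congr 1
        rw [pvIfMax]
        rw [show max l r + p = max (l + p) (r + p) by rw [max_add_add_right]]
        congr 1 <;> ring

-- translation invariance of pvMx
lemma pvMx_add (xs : List Int) : ∀ (j k c : Int), pvMx (j + c) (k + c) xs = pvMx j k xs := by
  induction xs with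
  | nil => intro j k c; rfl
  | cons x xs ih =>
    intro j k c
    simp only [pvMx]
    rw [show j + c - (k + c) = j - k by ring, show k + c + 1 = (k + 1) + c by ring, ih]

lemma pvOMax_assoc (a b c : Option Int) :
    pvOMax (pvOMax a b) c = pvOMax a (pvOMax b c) := by
  cases a <;> cases b <;> cases c <;> simp [pvOMax, max_assoc]

lemma pvMx_append (xs : List Int) : ∀ (ys : List Int) (j k : Int),
    pvMx j k (xs ++ ys) = pvOMax (pvMx j k xs) (pvMx j (k + xs.length) ys) := by
  induction xs with
  | nil => intro ys j k; simp [pvMx, pvOMax]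
  | cons x xs ih =>
    intro ys j k
    simp only [List.cons_append, pvMx, List.length_cons, pvOMax_assoc]
    rw [ih ys j (k + 1)]
    congr 2
    push_cast
    ring

lemma pvOMax_map_sub (a b : Option Int) (c : Int) :
    (pvOMax a b).map (fun v => v - c) = pvOMax (a.map (fun v => v - c)) (b.map (fun v => v - c)) := by
  cases a <;> cases b <;> simp [pvOMax] <;>
    (apply le_antisymm <;> simp [le_max_iff, max_le_iff] <;> omega)

-- a position left of every source: the whole cone is the k-edge value minus the distance
lemma pvMx_farL (ys : List Int) : ∀ (j k : Int), j ≤ k →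
    pvMx j k ys = (pvMx k k ys).map (fun v => v - (k - j)) := by
  induction ys with
  | nil => intro j k _; rfl
  | cons y ys ih =>
    intro j k hjk
    simp only [pvMx, pvOMax_map_sub]
    congr 1
    · simp only [Option.map_some]
      congr 1
      rw [abs_of_nonpos (by omega), abs_of_nonpos (by omega)]
      ring
    · rw [ih j (k + 1) (by omega), ih k (k + 1) (by omega), Option.map_map]
      congr 1
      funext v
      simp
      ring

-- a position right of every source
lemma pvMx_farR (xs : List Int) : ∀ (j k : Int), k + (xs.length : Int) - 1 ≤ j →
    pvMx j k xs = (pvMx (k + (xs.length : Int) - 1) k xs).map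
      (fun v => v - (j - (k + (xs.length : Int) - 1))) := by
  induction xs with
  | nil => intro j k _; rfl
  | cons x xs ih =>
    intro j k hk
    have h1 : (0:Int) ≤ xs.length := Int.natCast_nonneg _
    simp only [List.length_cons] at hk ⊢
    push_cast at hk ⊢
    rw [show k + ((xs.length : Int) + 1) - 1 = k + (xs.length : Int) by ring] at hk ⊢
    simp only [pvMx, pvOMax_map_sub]
    congr 1
    · simp only [Option.map_some]
      congr 1
      rw [abs_of_nonneg (by omega), abs_of_nonneg (by omega)]
      ring
    · rw [ih j (k + 1) (by omega),
          show k + 1 + (xs.length : Int) - 1 = k + (xs.length : Int) from by ring]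

lemma pvMx_cons_isSome (x : Int) (xs : List Int) (j k : Int) :
    (pvMx j k (x :: xs)).isSome = true := by
  simp only [pvMx]
  cases pvMx j (k + 1) xs <;> simp [pvOMax]

lemma pvBQgo_length (q : Option Int) (pre : List Int) : ∀ (n : Nat) (j : Int),
    (pvBQgo q pre j n).length = n := by
  intro n
  induction n with
  | zero => intro j; rfl
  | succ n ih => intro j; simp [pvBQgo, ih]

lemma pvBQgo_append_count (q : Option Int) (xs : List Int) : ∀ (a b : Nat) (j : Int),
    pvBQgo q xs j (a + b) = pvBQgo q xs j a ++ pvBQgo q xs (j + a) b := by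
  intro a
  induction a with
  | zero => intro b j; simp [pvBQgo]
  | succ a ih =>
    intro b j
    rw [show a + 1 + b = (a + b) + 1 by ring]
    simp only [pvBQgo, ih, List.cons_append]
    congr 2
    push_cast
    ring

lemma pvBQgo_none_cons (pre : List Int) (j : Int) (n : Nat) :
    pvBQgo none pre j (n + 1) = (pvMx j 0 pre).getD 0 :: pvBQgo none pre (j + 1) n := by
  simp [pvBQgo, pvQv, pvOMax]

lemma pvSweep_cons (q : Option Int) (x : Int) (xs : List Int) :
    pvSweep q (x :: xs) = pvStep q x :: pvSweep (some (pvStep q x)) xs := by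
  cases q <;> simp [pvSweep, pvStep]

lemma pvMx01 (xs : List Int) : pvMx 0 1 xs = (pvMx 0 0 xs).map (fun v => v - 1) := by
  rw [pvMx_farL xs 0 1 (by omega)]
  have h := pvMx_add xs 0 0 1
  simp only [zero_add] at h
  rw [h]
  norm_num

lemma head_rsw (xs : List Int) : (pvRsw xs).head? = pvMx 0 0 xs := by
  induction xs with
  | nil => rfl
  | cons x xs ih =>
    simp only [pvRsw, List.head?_cons, pvMx]
    rw [show (0 : Int) + 1 = 1 from rfl, pvMx01, ← ih]
    cases (pvRsw xs).head? <;> simp [pvOMax, pvStep] <;> norm_num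

lemma pvBQgo_shift (n : Nat) : ∀ (xs : List Int) (x : Int) (q : Option Int) (j : Int), 0 ≤ j →
    pvBQgo q (x :: xs) (j + 1) n = pvBQgo (some (pvStep q x)) xs j n := by
  induction n with
  | zero => intros; rfl
  | succ n ih =>
    intro xs x q j hj
    simp only [pvBQgo]
    have h2 : pvMx (j + 1) 1 xs = pvMx j 0 xs := by
      have := pvMx_add xs j 0 1; simpa using this
    have hmx : pvMx (j + 1) 0 (x :: xs) = pvOMax (some (x - (j + 1))) (pvMx j 0 xs) := by
      simp only [pvMx, show (0 : Int) + 1 = 1 from rfl, h2]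
      rw [abs_of_nonneg (by omega : (0:Int) ≤ j + 1 - 0)]
      norm_num
    rw [hmx]
    congr 1
    · cases q <;> cases h : pvMx j 0 xs <;>
        simp [pvQv, pvOMax, pvStep] <;>
        (apply le_antisymm <;> simp [le_max_iff, max_le_iff] <;> omega)
    · have := ih xs x q (j + 1) (by omega)
      rw [← this]

lemma pvSweepRsw (pre : List Int) : ∀ (q : Option Int),
    List.zipWith max (pvSweep q pre) (pvRsw pre) = pvBQgo q pre 0 pre.length := by
  induction pre with
  | nil => intro q; rfl
  | cons x xs ih =>
    intro q
    rw [pvSweep_cons]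
    simp only [pvRsw, List.zipWith_cons_cons, List.length_cons, pvBQgo]
    rw [ih (some (pvStep q x))]
    congr 1
    · -- heads
      have hmx : pvMx 0 0 (x :: xs) = pvOMax (some x) ((pvRsw xs).head?.map (fun v => v - 1)) := by
        simp only [pvMx, show (0 : Int) + 1 = 1 from rfl, pvMx01, ← head_rsw]
        norm_num
      rw [hmx]
      cases q <;> cases (pvRsw xs).head? <;>
        simp [pvQv, pvOMax, pvStep] <;>
        (apply le_antisymm <;> simp [le_max_iff, max_le_iff] <;> omega)
    · rw [show (0 : Int) + 1 = 1 from rfl, ← pvBQgo_shift xs.length xs x q 0 le_rfl]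
      norm_num

lemma pvBQgo_ne_nil (xs : List Int) (j : Int) (n : Nat) (h : n ≠ 0) :
    pvBQgo none xs j n ≠ [] := by
  intro hh
  have := pvBQgo_length none xs n j
  rw [hh] at this
  simp at this
  omega

lemma pvBQgo_headD (ys : List Int) (hy : ys ≠ []) :
    (pvBQgo none ys 0 ys.length).headD 0 = (pvMx 0 0 ys).getD 0 := by
  cases ys with
  | nil => exact absurd rfl hy
  | cons y ys => simp [List.length_cons, pvBQgo_none_cons]

lemma pvBQgo_getLastD (xs : List Int) : ∀ (n : Nat) (j : Int),
    (pvBQgo none xs j (n + 1)).getLastD 0 = (pvMx (j + n) 0 xs).getD 0 := by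
  intro n
  induction n with
  | zero => intro j; simp [pvBQgo, pvQv, pvOMax]
  | succ n ih =>
    intro j
    rw [pvBQgo_none_cons]
    have ht := pvBQgo_ne_nil xs (j + 1) (n + 1) (by omega)
    cases hc : pvBQgo none xs (j + 1) (n + 1) with
    | nil => exact absurd hc ht
    | cons b t =>
      have h1 := ih (j + 1)
      rw [hc, List.getLastD_cons] at h1
      rw [List.getLastD_cons, List.getLastD_cons, h1]
      congr 2
      push_cast
      ring

lemma pvMx_some_of_ne_nil (xs : List Int) (hx : xs ≠ []) (j k : Int) :
    ∃ a, pvMx j k xs = some a := by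
  cases xs with
  | nil => exact absurd rfl hx
  | cons x xs => exact Option.isSome_iff_exists.mp (pvMx_cons_isSome x xs j k)

lemma pvCombL_eq (xs ys : List Int) (hx : xs ≠ []) (hy : ys ≠ []) : ∀ (n : Nat) (j : Int),
    0 ≤ j → j + (n : Int) = (xs.length : Int) →
    pvCombL ((pvMx 0 0 ys).getD 0) (n : Int) (pvBQgo none xs j n) = pvBQgo none (xs ++ ys) j n := by
  intro n
  induction n with
  | zero => intro j _ _; rfl
  | succ n ih =>
    intro j hj hsum
    rw [pvBQgo_none_cons, pvBQgo_none_cons]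
    simp only [pvCombL]
    congr 1
    · rw [pvMx_append]
      have hys : pvMx j (0 + (xs.length : Int)) ys
          = (pvMx 0 0 ys).map (fun v => v - ((xs.length : Int) - j)) := by
        rw [pvMx_farL ys j (0 + (xs.length : Int)) (by push_cast at hsum; omega)]
        have h0 := pvMx_add ys 0 0 (xs.length : Int)
        simp only [zero_add] at h0 ⊢
        rw [h0]
      obtain ⟨a, ha⟩ := pvMx_some_of_ne_nil xs hx j 0
      obtain ⟨b, hb⟩ := pvMx_some_of_ne_nil ys hy 0 0
      rw [hys, ha, hb]
      simp only [Option.map_some, pvOMax, Option.getD_some]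
      have hn : (xs.length : Int) - j = (n : Int) + 1 := by push_cast at hsum; omega
      rw [hn]
      push_cast
      ring_nf
    · rw [show ((n + 1 : Nat) : Int) - 1 = (n : Int) by push_cast; ring]
      exact ih (j + 1) (by omega) (by push_cast at hsum ⊢; omega)

lemma pvCombR_eq (xs ys : List Int) (hx : xs ≠ []) (hy : ys ≠ []) : ∀ (n : Nat) (i : Int),
    0 ≤ i →
    pvCombR ((pvMx ((xs.length : Int) - 1) 0 xs).getD 0) i (pvBQgo none ys i n)
      = pvBQgo none (xs ++ ys) ((xs.length : Int) + i) n := by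
  intro n
  induction n with
  | zero => intro i _; rfl
  | succ n ih =>
    intro i hi
    rw [pvBQgo_none_cons, pvBQgo_none_cons]
    simp only [pvCombR]
    congr 1
    · rw [pvMx_append]
      have hlen1 : (1 : Int) ≤ (xs.length : Int) := by
        have : xs.length ≠ 0 := fun hh => hx (List.length_eq_zero_iff.mp hh)
        omega
      have hys : pvMx ((xs.length : Int) + i) (0 + (xs.length : Int)) ys = pvMx i 0 ys := by
        have h0 := pvMx_add ys i 0 (xs.length : Int)
        rw [show (xs.length : Int) + i = i + (xs.length : Int) by ring]
        simpa using h0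
      have hxs : pvMx ((xs.length : Int) + i) 0 xs
          = (pvMx (0 + (xs.length : Int) - 1) 0 xs).map
              (fun v => v - ((xs.length : Int) + i - (0 + (xs.length : Int) - 1))) := by
        exact pvMx_farR xs ((xs.length : Int) + i) 0 (by omega)
      obtain ⟨a, ha⟩ := pvMx_some_of_ne_nil xs hx ((xs.length : Int) - 1) 0
      obtain ⟨b, hb⟩ := pvMx_some_of_ne_nil ys hy i 0
      rw [hys, hxs, hb]
      rw [show (0 : Int) + (xs.length : Int) - 1 = (xs.length : Int) - 1 by ring, ha]
      simp only [Option.map_some, pvOMax, Option.getD_some]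
      apply le_antisymm <;> simp [le_max_iff, max_le_iff] <;> omega
    · rw [show (xs.length : Int) + i + 1 = (xs.length : Int) + (i + 1) by ring]
      exact ih (i + 1) (by omega)

lemma pvSpread_eq : ∀ (N : Nat) (vals : List Int), vals.length ≤ N →
    pvSpread vals = pvBQgo none vals 0 vals.length := by
  intro N
  induction N with
  | zero =>
    intro vals h
    have : vals = [] := List.length_eq_zero_iff.mp (by omega)
    subst this
    rw [pvSpread]
    simp [pvBQgo]
  | succ N ih =>
    intro vals h
    rw [pvSpread]
    by_cases h1 : vals.length ≤ 1
    · rw [dif_pos h1]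
      cases vals with
      | nil => rfl
      | cons x t =>
        cases t with
        | nil =>
          simp [pvBQgo, pvQv, pvOMax, pvMx]
        | cons y t => simp at h1
    · rw [dif_neg h1]
      push_neg at h1
      show pvCombL ((pvSpread (List.drop (vals.length / 2) vals)).headD 0)
            ((pvSpread (List.take (vals.length / 2) vals)).length : Int)
            (pvSpread (List.take (vals.length / 2) vals))
          ++ pvCombR ((pvSpread (List.take (vals.length / 2) vals)).getLastD 0) 0
            (pvSpread (List.drop (vals.length / 2) vals))
          = pvBQgo none vals 0 vals.length
      have hmid1 : 1 ≤ vals.length / 2 := by omega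
      have hmid2 : vals.length / 2 < vals.length := by omega
      have hxs : (vals.take (vals.length / 2)).length = vals.length / 2 := by
        simp; omega
      have hys : (vals.drop (vals.length / 2)).length = vals.length - vals.length / 2 := by
        simp
      have hxne : vals.take (vals.length / 2) ≠ [] := by
        intro hh; rw [hh] at hxs; simp at hxs; omega
      have hyne : vals.drop (vals.length / 2) ≠ [] := by
        intro hh; rw [hh] at hys; simp at hys; omega
      rw [ih _ (by simp; omega), ih _ (by simp; omega)]
      rw [pvBQgo_length, pvBQgo_headD _ hyne, hxs]
      obtain ⟨m, hm⟩ : ∃ m, vals.length / 2 = m + 1 := ⟨vals.length / 2 - 1, by omega⟩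
      have hgl : (pvBQgo none (vals.take (vals.length / 2)) 0 (vals.length / 2)).getLastD 0
          = (pvMx (((vals.length / 2 : Nat) : Int) - 1) 0 (vals.take (vals.length / 2))).getD 0 := by
        rw [hm, pvBQgo_getLastD]
        congr 2
        push_cast
        ring
      rw [hgl]
      rw [pvCombL_eq _ _ hxne hyne (vals.length / 2) 0 le_rfl (by rw [hxs]; push_cast; ring)]
      rw [show ((vals.length / 2 : Nat) : Int) - 1 = ((vals.take (vals.length / 2)).length : Int) - 1 by rw [hxs]]
      rw [pvCombR_eq _ _ hxne hyne (vals.drop (vals.length / 2)).length 0 le_rfl]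
      rw [show ((vals.take (vals.length / 2)).length : Int) + 0 = ((vals.take (vals.length / 2)).length : Int) by ring]
      rw [hxs]
      rw [show ((vals.length / 2 : Nat) : Int) = ((0 : Int) + (vals.length / 2 : Nat)) by ring]
      rw [← pvBQgo_append_count, List.take_append_drop]
      congr 1
      rw [hys]
      omega

lemma pvRowA (pre row : List Int) :
    pvCombineA 0 (pvLeftA 0 none pre) (pvRightA 0 pre) row
      = List.zipWith (fun c p => c + p) (pvSpread pre) row := by
  have hl : pvLeftA 0 none pre = pvAddIdx 0 (pvSweep none pre) := by
    simpa using pvLeftA_eq pre 0 none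
  rw [hl, pvRightA_eq, pvCombineA_eq, pvSweepRsw, pvSpread_eq pre.length pre le_rfl]

lemma pvFold (rows : List (List Int)) : ∀ (pre : List Int),
    rows.foldl (fun pre row => pvCombineA 0 (pvLeftA 0 none pre) (pvRightA 0 pre) row) pre
      = rows.foldl (fun best row => List.zipWith (fun c p => c + p) (pvSpread best) row) pre := by
  intro pre
  simp only [pvRowA]

-- ===== VERDICT (by name: the statement is the Claim_ definition above) =====
theorem lc_1937_spec : Claim_equal_lc_1937 := by
  intro points _ _
  unfold Spec_lc_1937 lc_1937 lc_1937_alt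
  exact congrArg (fun l => (PySem.List.max? l (fun x => x)).getD 0)
    (pvFold (points.drop 1) (points.headD []))
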